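-- pv_equiv track=rewrite | github.com/nongfang55/HuaweiProject | source/data/service/AsyncApiHelper.py | urlAppendParams
-- ===== SOURCE A (Python) =====
-- def urlAppendParams(url, paramsDict):
--     isFirst = True
--     for k, v in paramsDict.items():
--         if isFirst:
--             url += f'?{k}={v}'
--             isFirst = False
--         else:
--             url += f'&{k}={v}'
--     return url
-- ===== SOURCE B (Python) =====
-- def urlAppendParams(url, paramsDict):
--     parts = [f'{k}={v}' for k, v in paramsDict.items()]
--     if not parts:
--         return url
--     return url + '?' + '&'.join(parts)
-- ===== Notes on version B (the rewrite author's own statement) =====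
-- stated objective: idiomatic
-- what changed: Replaces the per-iteration isFirst flag and string concatenation loop by building the k=v parts once and joining them with '&' behind a single '?' prefix (url unchanged for an empty dict).
import Mathlib
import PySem

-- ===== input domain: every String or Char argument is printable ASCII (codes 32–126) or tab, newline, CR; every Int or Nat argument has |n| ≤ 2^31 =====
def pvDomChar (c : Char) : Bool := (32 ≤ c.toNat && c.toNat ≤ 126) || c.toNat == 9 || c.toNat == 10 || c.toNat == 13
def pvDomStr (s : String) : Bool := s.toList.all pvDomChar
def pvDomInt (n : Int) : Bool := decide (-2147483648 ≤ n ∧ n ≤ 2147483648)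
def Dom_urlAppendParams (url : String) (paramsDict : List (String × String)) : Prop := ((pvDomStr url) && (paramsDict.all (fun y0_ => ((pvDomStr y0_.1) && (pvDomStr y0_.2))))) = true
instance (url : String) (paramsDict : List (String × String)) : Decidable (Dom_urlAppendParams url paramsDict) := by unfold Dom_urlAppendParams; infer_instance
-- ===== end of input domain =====

-- B replaces A's per-iteration isFirst flag and in-place concatenation by building the
-- 'k=v' parts once and joining them with '&' behind a single one-time '?' prefix (idiomatic).

-- ===== PORT A =====
-- literal transliteration: loop over items with (url, isFirst) state
def urlAppendParams (url : String) (paramsDict : List (String × String)) : String :=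
  (paramsDict.foldl
    (fun st kv =>
      if st.2 then (st.1 ++ "?" ++ kv.1 ++ "=" ++ kv.2, false)
      else (st.1 ++ "&" ++ kv.1 ++ "=" ++ kv.2, false))
    (url, true)).1

-- ===== PORT B =====
-- literal transliteration of Source B: build parts, then join ('&'.join → PySem.Str.join)
def urlAppendParams_alt (url : String) (paramsDict : List (String × String)) : String :=
  let parts := paramsDict.map (fun kv => kv.1 ++ "=" ++ kv.2)
  match parts with
  | [] => url
  | _ => url ++ "?" ++ PySem.Str.join "&" parts

-- ===== PRECONDITION & SPEC =====
def Spec_urlAppendParams (url : String) (paramsDict : List (String × String)) (out : String) : Prop := out = urlAppendParams_alt url paramsDict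
instance (url : String) (paramsDict : List (String × String)) (out : String) : Decidable (Spec_urlAppendParams url paramsDict out) := by unfold Spec_urlAppendParams; infer_instance

-- ===== CLAIM (what is proved, stated in full; the proofs are below) =====
def Claim_equal_urlAppendParams : Prop := ∀ (url : String) (paramsDict : List (String × String)), Dom_urlAppendParams url paramsDict → Spec_urlAppendParams url paramsDict (urlAppendParams url paramsDict)

-- ===== LEMMAS AND PROOFS =====

-- the "&k=v" suffix produced for every non-first item
def pvAmp : List (String × String) → String
  | [] => ""
  | kv :: r => "&" ++ kv.1 ++ "=" ++ kv.2 ++ pvAmp r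

theorem pvFoldFalse (l : List (String × String)) (s : String) :
    (l.foldl
      (fun st kv =>
        if st.2 then (st.1 ++ "?" ++ kv.1 ++ "=" ++ kv.2, false)
        else (st.1 ++ "&" ++ kv.1 ++ "=" ++ kv.2, false))
      (s, false)).1 = s ++ pvAmp l := by
  induction l generalizing s with
  | nil => simp [pvAmp]
  | cons kv r ih =>
    rw [List.foldl_cons]
    simp only [Bool.false_eq_true, if_false]
    rw [ih]
    simp [pvAmp, String.append_assoc]

theorem pvJoinCons (p q : String) (r : List String) :
    PySem.Str.join "&" (p :: q :: r) = p ++ "&" ++ PySem.Str.join "&" (q :: r) := by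
  apply String.toList_inj.mp
  simp [PySem.Str.toList_join, PySem.Chars.join_cons_cons]

theorem pvJoinAmp (r : List (String × String)) (kv : String × String) :
    PySem.Str.join "&" ((kv.1 ++ "=" ++ kv.2) :: r.map (fun kv => kv.1 ++ "=" ++ kv.2))
      = kv.1 ++ "=" ++ kv.2 ++ pvAmp r := by
  induction r generalizing kv with
  | nil =>
    apply String.toList_inj.mp
    simp [PySem.Str.toList_join, PySem.Chars.join_singleton, pvAmp]
  | cons kv2 r2 ih =>
    rw [List.map_cons, pvJoinCons, ih]
    simp [pvAmp, String.append_assoc]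

-- ===== VERDICT (by name: the statement is the Claim_ definition above) =====
theorem urlAppendParams_spec : Claim_equal_urlAppendParams := by
  intro url paramsDict _
  unfold Spec_urlAppendParams urlAppendParams urlAppendParams_alt
  cases paramsDict with
  | nil => rfl
  | cons kv r =>
    simp only [List.foldl_cons, List.map_cons, if_true]
    rw [pvFoldFalse, pvJoinAmp]
    simp [String.append_assoc]
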